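-- pv_equiv track=rewrite | github.com/miliar/Code_Jam_Webscraper | Solutions_python/Problem_200/4560.py | mnm
-- ===== SOURCE A (Python) =====
-- def mnm(X):
--     maxi,mini = 0,0
--     for i in range(len(X)):
--         if i == len(X) -1:
--             maxi =  i
--             break
--         elif X[i] > X[i+1]:
--             maxi =  i
--             break
--     for i in range(len(X)):
--         if X[i] == X[maxi]:
--             mini = i
--             break
--     return mini,maxi
-- ===== SOURCE B (Python) =====
-- def mnm(X):
--     if not X:
--         return 0, 0
--     # descent position: first i with X[i] > X[i+1] among zipped adjacent pairs, else len-1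
--     maxi = len(X) - 1
--     for i, (a, b) in enumerate(zip(X, X[1:])):
--         if a > b:
--             maxi = i
--             break
--     # X[0..maxi] is non-decreasing, so the first occurrence of X[maxi]
--     # is found by binary search (leftmost index with X[idx] >= X[maxi])
--     v = X[maxi]
--     lo, hi = 0, maxi
--     while lo < hi:
--         mid = (lo + hi) // 2
--         if X[mid] < v:
--             lo = mid + 1
--         else:
--             hi = mid
--     return lo, maxi
-- ===== Notes on version B (the rewrite author's own statement) =====
-- stated objective: faster
-- what changed: B finds the descent by scanning zipped adjacent pairs and then locates the first occurrence of the pivot value by an O(log n) binary search on the non-decreasing prefix X[0..maxi], instead of A's second linear rescan of the list from index 0.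
import Mathlib
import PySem

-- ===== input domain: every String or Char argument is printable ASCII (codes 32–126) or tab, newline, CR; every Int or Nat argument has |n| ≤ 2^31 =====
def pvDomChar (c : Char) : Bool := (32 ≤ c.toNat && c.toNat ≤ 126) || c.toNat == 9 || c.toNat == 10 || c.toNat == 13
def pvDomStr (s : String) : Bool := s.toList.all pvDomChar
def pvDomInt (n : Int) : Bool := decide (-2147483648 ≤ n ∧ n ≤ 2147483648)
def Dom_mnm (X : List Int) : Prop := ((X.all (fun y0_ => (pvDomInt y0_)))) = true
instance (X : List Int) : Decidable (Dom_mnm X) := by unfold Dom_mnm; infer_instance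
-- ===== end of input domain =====

-- B finds the descent over zipped adjacent pairs and then binary-searches the non-decreasing
-- prefix for the first occurrence of the pivot value, replacing A's linear rescan (alternative).

-- ===== PORT A =====
-- first loop of A: first i with X[i] > X[i+1], breaking at i = len-1; 0 if the loop never runs
def aFindMaxi (X : List Int) (i : Nat) : Int :=
  if _h : i < X.length then
    if i = X.length - 1 then (i : Int)
    else if X.getD i 0 > X.getD (i+1) 0 then (i : Int)
    else aFindMaxi X (i+1)
  else 0
termination_by X.length - i

-- second loop of A: first i with X[i] == X[maxi]; 0 if the loop never matches / never runs
def aFindMini (X : List Int) (m : Nat) (i : Nat) : Int :=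
  if _h : i < X.length then
    if X.getD i 0 = X.getD m 0 then (i : Int)
    else aFindMini X m (i+1)
  else 0
termination_by X.length - i

def mnm (X : List Int) : Int × Int :=
  let maxi := aFindMaxi X 0
  let mini := aFindMini X maxi.toNat 0
  (mini, maxi)

-- ===== PORT B =====
-- Source B's 'for i, (a, b) in enumerate(zip(X, X[1:]))' loop: first pair index with a > b
def bFindDescent (i : Nat) : List (Int × Int) → Option Nat
  | [] => none
  | (a, b) :: rest => if a > b then some i else bFindDescent (i + 1) rest

-- Source B's while-loop: leftmost index in [lo, hi] with X[idx] ≥ v (indices are non-negative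
-- in Source B, so Nat arguments and Nat division are exact for Python's ints and //)
def bSearch (X : List Int) (v : Int) (lo hi : Nat) : Nat :=
  if lo < hi then
    let mid := (lo + hi) / 2
    if X.getD mid 0 < v then bSearch X v (mid + 1) hi else bSearch X v lo mid
  else lo
termination_by hi - lo

def mnm_alt (X : List Int) : Int × Int :=
  if X = [] then (0, 0)
  else
    let maxi := (bFindDescent 0 (X.zip (X.drop 1))).getD (X.length - 1)
    let v := X.getD maxi 0
    ((bSearch X v 0 maxi : Int), (maxi : Int))

-- ===== PRECONDITION & SPEC =====
def Spec_mnm (X : List Int) (out : Int × Int) : Prop := out = mnm_alt X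
instance (X : List Int) (out : Int × Int) : Decidable (Spec_mnm X out) := by unfold Spec_mnm; infer_instance

-- ===== CLAIM (what is proved, stated in full; the proofs are below) =====
def Claim_equal_mnm : Prop := ∀ (X : List Int), Dom_mnm X → Spec_mnm X (mnm X)

-- ===== LEMMAS AND PROOFS =====

-- A's first loop agrees with B's scan over the zipped adjacent pairs of the remaining suffix
theorem aFindMaxi_eq_descent (X : List Int) : ∀ (fuel i : Nat), X.length - i ≤ fuel →
    i < X.length →
    aFindMaxi X i =
      (((bFindDescent i ((X.drop i).zip (X.drop (i + 1)))).getD (X.length - 1) : Nat) : Int) := by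
  intro fuel
  induction fuel with
  | zero => intro i hf hi; omega
  | succ f ih =>
    intro i hf hi
    rw [aFindMaxi, dif_pos hi]
    by_cases hlast : i = X.length - 1
    · have hdrop : X.drop (i + 1) = [] := List.drop_eq_nil_of_le (by omega)
      rw [hdrop, List.zip_nil_right]
      simp [bFindDescent, hlast]
    · have hi1 : i + 1 < X.length := by omega
      have hcons : (X.drop i).zip (X.drop (i + 1)) =
          (X.getD i 0, X.getD (i + 1) 0) :: ((X.drop (i + 1)).zip (X.drop (i + 2))) := by
        rw [List.drop_eq_getElem_cons hi, List.drop_eq_getElem_cons hi1, List.zip_cons_cons,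
          List.getD_eq_getElem X 0 hi, List.getD_eq_getElem X 0 hi1,
          ← List.drop_eq_getElem_cons hi1]
      rw [hcons]
      by_cases hgt : X.getD i 0 > X.getD (i + 1) 0
      · simp only [bFindDescent, if_neg hlast, if_pos hgt, Option.getD_some]
      · simp only [bFindDescent, if_neg hlast, if_neg hgt]
        exact ih (i + 1) (by omega) hi1

-- characterization of A's first loop: it returns a Nat index m with i ≤ m < len and
-- adjacent non-decrease on [i, m)
theorem aFindMaxi_char (X : List Int) : ∀ (fuel i : Nat), X.length - i ≤ fuel →
    i < X.length →
    ∃ m : Nat, aFindMaxi X i = (m : Int) ∧ i ≤ m ∧ m < X.length ∧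
      ∀ j, i ≤ j → j < m → X.getD j 0 ≤ X.getD (j + 1) 0 := by
  intro fuel
  induction fuel with
  | zero => intro i hf hi; omega
  | succ f ih
    =>
    intro i hf hi
    rw [aFindMaxi, dif_pos hi]
    by_cases hlast : i = X.length - 1
    · exact ⟨i, by rw [if_pos hlast], le_rfl, hi, fun j h1 h2 => by omega⟩
    · by_cases hgt : X.getD i 0 > X.getD (i + 1) 0
      · exact ⟨i, by rw [if_neg hlast, if_pos hgt], le_rfl, hi, fun j h1 h2 => by omega⟩
      · obtain ⟨m, hm, h1, h2, h3⟩ := ih (i + 1) (by omega) (by omega)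
        refine ⟨m, by rw [if_neg hlast, if_neg hgt, hm], by omega, h2, ?_⟩
        intro j hj1 hj2
        rcases Nat.eq_or_lt_of_le hj1 with h | h
        · rw [← h]; omega
        · exact h3 j h hj2

-- adjacent non-decrease gives monotonicity on the prefix
theorem prefix_mono (X : List Int) (m : Nat)
    (hadj : ∀ j, j < m → X.getD j 0 ≤ X.getD (j + 1) 0) :
    ∀ j k, j ≤ k → k ≤ m → X.getD j 0 ≤ X.getD k 0 := by
  intro j k hjk hkm
  induction k with
  | zero => rw [Nat.le_zero.mp hjk]
  | succ n ih =>
    rcases Nat.eq_or_lt_of_le hjk with h | h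
    · rw [h]
    · exact le_trans (ih (by omega) (by omega)) (hadj n (by omega))

-- aFindMini starting at j returns the unique first match k ≥ j
theorem aFindMini_first (X : List Int) (m : Nat) : ∀ (fuel j k : Nat), k - j ≤ fuel → j ≤ k →
    k < X.length →
    X.getD k 0 = X.getD m 0 → (∀ l, j ≤ l → l < k → X.getD l 0 ≠ X.getD m 0) →
    aFindMini X m j = (k : Int) := by
  intro fuel
  induction fuel with
  | zero =>
    intro j k hf hjk hk hmatch _
    have hjk' : j = k := by omega
    subst hjk'
    rw [aFindMini, dif_pos hk, if_pos hmatch]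
  | succ f ih =>
    intro j k hf hjk hk hmatch hnone
    have hj : j < X.length := lt_of_le_of_lt hjk hk
    rw [aFindMini, dif_pos hj]
    by_cases hm : X.getD j 0 = X.getD m 0
    · have hjeq : j = k := by
        by_contra hne
        exact hnone j le_rfl (by omega) hm
      rw [if_pos hm, hjeq]
    · have hjltk : j < k := by
        rcases Nat.lt_or_ge j k with h | h
        · exact h
        · exact absurd (by rw [show j = k by omega]; exact hmatch) hm
      rw [if_neg hm]
      exact ih (j + 1) k (by omega) (by omega) hk hmatch
        (fun l hl1 hl2 => hnone l (by omega) hl2)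

-- binary-search invariant on a monotone prefix: result r is the leftmost index with X[r] ≥ v
theorem bSearch_char (X : List Int) (v : Int) (m : Nat)
    (hmono : ∀ j k, j ≤ k → k ≤ m → X.getD j 0 ≤ X.getD k 0) :
    ∀ (fuel lo hi : Nat), hi - lo ≤ fuel →
    lo ≤ hi → hi ≤ m →
    (∀ j, j < lo → X.getD j 0 < v) → v ≤ X.getD hi 0 →
    lo ≤ bSearch X v lo hi ∧ bSearch X v lo hi ≤ hi ∧
      (∀ j, j < bSearch X v lo hi → X.getD j 0 < v) ∧ v ≤ X.getD (bSearch X v lo hi) 0 := by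
  intro fuel
  induction fuel with
  | zero =>
    intro lo hi hf hle hhm hlow hhi
    have h : lo = hi := by omega
    subst h
    rw [bSearch, if_neg (by omega)]
    exact ⟨le_rfl, le_rfl, hlow, hhi⟩
  | succ f ih =>
    intro lo hi hf hle hhm hlow hhi
    by_cases hlt : lo < hi
    · rw [bSearch, if_pos hlt]
      set mid := (lo + hi) / 2 with hmid
      have hm1 : lo ≤ mid := by omega
      have hm2 : mid < hi := by omega
      by_cases hv : X.getD mid 0 < v
      · rw [if_pos hv]
        obtain ⟨h1, h2, h3, h4⟩ := ih (mid + 1) hi (by omega) (by omega) hhm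
          (fun j hj => lt_of_le_of_lt (hmono j mid (by omega) (by omega)) hv) hhi
        exact ⟨by omega, h2, h3, h4⟩
      · rw [if_neg hv]
        obtain ⟨h1, h2, h3, h4⟩ := ih lo mid (by omega) (by omega) (by omega) hlow (by omega)
        exact ⟨h1, by omega, h3, h4⟩
    · rw [bSearch, if_neg hlt]
      exact ⟨le_rfl, by omega, hlow, by rw [show lo = hi by omega]; exact hhi⟩

-- ===== VERDICT (by name: the statement is the Claim_ definition above) =====
theorem mnm_spec : Claim_equal_mnm := by
  intro X _
  unfold Spec_mnm mnm mnm_alt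
  by_cases hX : X = []
  · subst hX
    simp [aFindMaxi, aFindMini]
  · rw [if_neg hX]
    have hlen : 0 < X.length := List.length_pos_iff.mpr hX
    -- B's descent scan equals A's first loop
    have hdesc := aFindMaxi_eq_descent X X.length 0 (by omega) hlen
    rw [List.drop_zero] at hdesc
    set mb := (bFindDescent 0 (X.zip (X.drop 1))).getD (X.length - 1) with hmb
    obtain ⟨m, hm, _, hmlt, hadj⟩ := aFindMaxi_char X X.length 0 (by omega) hlen
    have hmm : mb = m := by exact_mod_cast hdesc.symm.trans hm
    subst hmm
    have hmono := prefix_mono X mb (fun j hj => hadj j (by omega) hj)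
    obtain ⟨_, hr2, hr3, hr4⟩ := bSearch_char X (X.getD mb 0) mb hmono mb 0 mb
      (by omega) (by omega) le_rfl (by omega) le_rfl
    set r := bSearch X (X.getD mb 0) 0 mb with hr
    have hrv : X.getD r 0 = X.getD mb 0 := le_antisymm (hmono r mb hr2 le_rfl) hr4
    have hmini : aFindMini X (aFindMaxi X 0).toNat 0 = (r : Int) := by
      rw [hm, Int.toNat_natCast]
      exact aFindMini_first X mb r 0 r (by omega) (by omega) (by omega) hrv
        (fun l _ hl => ne_of_lt (hrv ▸ hr3 l hl))
    show (aFindMini X (aFindMaxi X 0).toNat 0, aFindMaxi X 0) =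
      (((bSearch X (X.getD mb 0) 0 mb : Nat) : Int), ((mb : Nat) : Int))
    rw [hmini, hm, hr]
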